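-- pv_equiv track=rewrite | github.com/waylandy/HelperBunny | sequence/utils.py | partition_a2m_string
-- ===== SOURCE A (Python) =====
-- def partition_a2m_string(a2m_string):
--     current, previous = True, True
--     partitions = ['']
--
--     for i in a2m_string:
--         current = i.islower()
--
--         if current:
--             if previous:
--                 partitions[-1] += i
--             else:
--                 partitions += [i]
--         else:
--             if previous:
--                 partitions += [i]
--             else:
--                 partitions += ['', i]
--
--         previous = current
--     if not previous:
--         partitions += ['']
--     return partitions
-- ===== SOURCE B (Python) =====
-- def partition_a2m_string(a2m_string):
--     n = len(a2m_string)
--     out = []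
--     start = 0
--     while True:
--         k = start
--         while k < n and a2m_string[k].islower():
--             k += 1
--         if k == n:
--             out.append(a2m_string[start:])
--             return out
--         out.append(a2m_string[start:k])
--         out.append(a2m_string[k])
--         start = k + 1
-- ===== Notes on version B (the rewrite author's own statement) =====
-- stated objective: alternative
-- what changed: Replaces A's per-character state machine (previous/current islower flags with four branch cases mutating the last partition) by an index-based span scanner: an inner loop finds the end of each leading lowercase run, the run and its following separator char are emitted as slices, and the outer loop restarts after the separator.
import Mathlib
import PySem

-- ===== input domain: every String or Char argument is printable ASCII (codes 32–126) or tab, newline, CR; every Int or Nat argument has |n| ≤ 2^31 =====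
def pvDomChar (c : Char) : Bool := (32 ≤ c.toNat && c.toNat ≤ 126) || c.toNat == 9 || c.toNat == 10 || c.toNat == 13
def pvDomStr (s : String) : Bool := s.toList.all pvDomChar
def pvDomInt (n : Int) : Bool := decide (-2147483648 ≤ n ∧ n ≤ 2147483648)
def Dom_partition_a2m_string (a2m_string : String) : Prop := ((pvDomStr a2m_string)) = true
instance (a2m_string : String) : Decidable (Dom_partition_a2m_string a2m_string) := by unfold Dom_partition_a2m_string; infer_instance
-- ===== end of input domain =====

-- B replaces A's per-character two-flag state machine by an index-based span scanner:
-- an inner loop finds the end of each leading lowercase run, the run and its following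
-- separator are emitted as slices, and the outer loop restarts after the separator.
-- Objective: alternative (same O(n) cost, different traversal). Strings are handled as
-- List Char internally (Lean's String.append is kernel-opaque) and re-packed at the end.

-- ===== PORT A =====
-- `partitions[-1] += i` (partitions is always nonempty in A)
def pvAppendLast : List (List Char) → Char → List (List Char)
  | [], c => [[c]]
  | [p], c => [p ++ [c]]
  | p :: ps, c => p :: pvAppendLast ps c

-- one iteration of A's for-loop; state = (previous, partitions)
def pvStepA (st : Bool × List (List Char)) (i : Char) : Bool × List (List Char) :=
  let current := PySem.Chars.islower i
  let partitions :=
    if current then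
      if st.1 then pvAppendLast st.2 i else st.2 ++ [[i]]
    else
      if st.1 then st.2 ++ [[i]] else st.2 ++ [[], [i]]
  (current, partitions)

def partition_a2m_string (a2m_string : String) : List String :=
  let st := a2m_string.toList.foldl pvStepA (true, [[]])
  (if !st.1 then st.2 ++ [[]] else st.2).map String.ofList

-- ===== PORT B =====
-- B's inner while loop: `while k < n and a2m_string[k].islower(): k += 1`
-- (a2m_string[k] is in range whenever it is read, so getD is exact)
def pvScanB (cs : List Char) (k : Nat) : Nat :=
  if h : k < cs.length ∧ PySem.Chars.islower (cs.getD k ' ') = true then pvScanB cs (k + 1) else k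
termination_by cs.length - k
decreasing_by omega

-- B's outer `while True` loop; fuel = n + 1 only makes the recursion total in Lean
-- (the fuel-0 value is never reached: each pass consumes at least one character)
def pvLoopB (cs : List Char) : Nat → Nat → List (List Char) → List (List Char)
  | 0, start, out => out ++ [cs.drop start]
  | fuel + 1, start, out =>
      let k := pvScanB cs start
      if k = cs.length then out ++ [cs.drop start]        -- out.append(s[start:]); return
      else pvLoopB cs fuel (k + 1)
        (out ++ [(cs.drop start).take (k - start), [cs.getD k ' ']])  -- s[start:k], s[k]

def partition_a2m_string_alt (a2m_string : String) : List String :=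
  (pvLoopB a2m_string.toList (a2m_string.toList.length + 1) 0 []).map String.ofList

-- ===== PRECONDITION & SPEC =====
def Spec_partition_a2m_string (a2m_string : String) (out : List String) : Prop := out = partition_a2m_string_alt a2m_string
instance (a2m_string : String) (out : List String) : Decidable (Spec_partition_a2m_string a2m_string out) := by unfold Spec_partition_a2m_string; infer_instance

-- ===== CLAIM (what is proved, stated in full; the proofs are below) =====
def Claim_equal_partition_a2m_string : Prop := ∀ (a2m_string : String), Dom_partition_a2m_string a2m_string → Spec_partition_a2m_string a2m_string (partition_a2m_string a2m_string)

-- ===== LEMMAS AND PROOFS =====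

-- proof-only common reference: length of the leading lowercase run
def pvLeadLower : List Char → Nat
  | [] => 0
  | c :: cs => if PySem.Chars.islower c then pvLeadLower cs + 1 else 0

theorem pvLeadLower_le (cs : List Char) : pvLeadLower cs ≤ cs.length := by
  induction cs with
  | nil => simp [pvLeadLower]
  | cons c cs ih => simp only [pvLeadLower, List.length_cons]; split <;> omega

-- proof-only reference partition: emit the leading run, the separator, recurse
def pvRec (cs : List Char) : List (List Char) :=
  if pvLeadLower cs = cs.length then [cs]
  else cs.take (pvLeadLower cs) :: [cs.getD (pvLeadLower cs) ' '] ::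
       pvRec (cs.drop (pvLeadLower cs + 1))
termination_by cs.length
decreasing_by
  have := pvLeadLower_le cs
  simp only [List.length_drop]; omega

theorem pvRec_exists_cons (cs : List Char) : ∃ h t, pvRec cs = h :: t := by
  rw [pvRec]; split
  · exact ⟨cs, [], rfl⟩
  · exact ⟨_, _, rfl⟩

theorem pvRec_nil : pvRec [] = [[]] := by
  rw [pvRec]; simp [pvLeadLower]

theorem pvRec_cons_lower {c : Char} (cs : List Char) (hc : PySem.Chars.islower c = true) :
    pvRec (c :: cs) = match pvRec cs with | [] => [] | h :: t => (c :: h) :: t := by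
  have hk : pvLeadLower (c :: cs) = pvLeadLower cs + 1 := by simp [pvLeadLower, hc]
  by_cases hlen : pvLeadLower cs = cs.length
  · rw [pvRec, if_pos (by simp [hk, hlen]),
        show pvRec cs = [cs] by rw [pvRec, if_pos hlen]]
  · rw [pvRec, if_neg (by simp [hk]; omega)]
    conv_rhs => rw [pvRec, if_neg hlen]
    simp [hk, List.take_succ_cons, List.drop_succ_cons]

theorem pvRec_cons_notlower {c : Char} (cs : List Char) (hc : PySem.Chars.islower c = false) :
    pvRec (c :: cs) = [] :: [c] :: pvRec cs := by
  have hk : pvLeadLower (c :: cs) = 0 := by simp [pvLeadLower, hc]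
  rw [pvRec, if_neg (by simp [hk])]
  simp [hk]

-- the per-character flush loop both programs are reduced to, then compared chunkwise
def pvGoB : List Char → List Char → List (List Char) → List (List Char)
  | [], buf, out => out ++ [buf]
  | c :: cs, buf, out =>
      if PySem.Chars.islower c then pvGoB cs (buf ++ [c]) out
      else pvGoB cs [] (out ++ [buf, [c]])

theorem pvGoB_eq_pvRec (cs : List Char) :
    ∀ (buf : List Char) (out : List (List Char)),
      pvGoB cs buf out = out ++ (match pvRec cs with | [] => [] | h :: t => (buf ++ h) :: t) := by
  induction cs with
  | nil => intro buf out; simp [pvGoB, pvRec_nil]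
  | cons c cs ih =>
      intro buf out
      obtain ⟨h, t, hrec⟩ := pvRec_exists_cons cs
      by_cases hc : PySem.Chars.islower c = true
      · rw [show pvGoB (c :: cs) buf out = pvGoB cs (buf ++ [c]) out by simp [pvGoB, hc],
            ih (buf ++ [c]) out, pvRec_cons_lower cs hc, hrec]
        simp
      · replace hc : PySem.Chars.islower c = false := by
          cases hh : PySem.Chars.islower c <;> simp_all
        rw [show pvGoB (c :: cs) buf out = pvGoB cs [] (out ++ [buf, [c]]) by simp [pvGoB, hc],
            ih [] (out ++ [buf, [c]]), pvRec_cons_notlower cs hc, hrec]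
        simp

theorem pvAppendLast_snoc (xs : List (List Char)) (b : List Char) (c : Char) :
    pvAppendLast (xs ++ [b]) c = xs ++ [b ++ [c]] := by
  induction xs with
  | nil => rfl
  | cons p ps ih =>
      cases ps with
      | nil => rfl
      | cons q qs => exact congrArg (List.cons p) ih

-- A-side loop invariant relating A's (previous, partitions) to the flush loop (buf, out):
-- prev = true → partitions = out ++ [buf];  prev = false → partitions = out ∧ buf = []
theorem pv_invariant (cs : List Char) :
    ∀ (prev : Bool) (parts : List (List Char)) (buf : List Char) (out : List (List Char)),
      (if prev then parts = out ++ [buf] else parts = out ∧ buf = []) →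
      (if !(cs.foldl pvStepA (prev, parts)).1 then (cs.foldl pvStepA (prev, parts)).2 ++ [[]]
       else (cs.foldl pvStepA (prev, parts)).2) = pvGoB cs buf out := by
  induction cs with
  | nil =>
      intro prev parts buf out h
      cases prev with
      | true => simpa [pvGoB] using h
      | false => simp [pvGoB, h.1, h.2]
  | cons c cs ih =>
      intro prev parts buf out h
      simp only [List.foldl_cons, pvGoB]
      by_cases hc : PySem.Chars.islower c = true
      · rw [if_pos hc]
        cases prev with
        | true =>
            simp only [if_pos] at h
            have hstep : pvStepA (true, parts) c = (true, pvAppendLast parts c) := by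
              simp [pvStepA, hc]
            rw [hstep]
            exact ih true _ (buf ++ [c]) out (by simp [h, pvAppendLast_snoc])
        | false =>
            obtain ⟨h1, h2⟩ := h
            have hstep : pvStepA (false, parts) c = (true, parts ++ [[c]]) := by
              simp [pvStepA, hc]
            rw [hstep]
            subst h2
            exact ih true _ [c] out (by simp [h1])
      · rw [if_neg hc]
        replace hc : PySem.Chars.islower c = false := by
          cases hh : PySem.Chars.islower c <;> simp_all
        cases prev with
        | true =>
            simp only [if_pos] at h
            have hstep : pvStepA (true, parts) c = (false, parts ++ [[c]]) := by
              simp [pvStepA, hc]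
            rw [hstep]
            exact ih false _ [] (out ++ [buf, [c]]) (by simp [h])
        | false =>
            obtain ⟨h1, h2⟩ := h
            have hstep : pvStepA (false, parts) c = (false, parts ++ [[], [c]]) := by
              simp [pvStepA, hc]
            rw [hstep]
            subst h2
            exact ih false _ [] (out ++ [[], [c]]) (by simp [h1])

-- B-side: the inner scan computes start + (length of the leading lowercase run of the suffix)
theorem pvScanB_eq (cs : List Char) (k : Nat) :
    pvScanB cs k = k + pvLeadLower (cs.drop k) := by
  rw [pvScanB]
  split
  · rename_i h
    have hd : cs.drop k = cs.getD k ' ' :: cs.drop (k + 1) := by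
      rw [List.getD_eq_getElem _ _ h.1]
      exact List.drop_eq_getElem_cons h.1
    rw [pvScanB_eq cs (k + 1), hd]
    simp only [pvLeadLower, h.2, if_pos]
    omega
  · rename_i h
    by_cases hk : k < cs.length
    · have hc : PySem.Chars.islower (cs.getD k ' ') = false := by
        cases hh : PySem.Chars.islower (cs.getD k ' ') <;> simp_all
      have hd : cs.drop k = cs.getD k ' ' :: cs.drop (k + 1) := by
        rw [List.getD_eq_getElem _ _ hk]
        exact List.drop_eq_getElem_cons hk
      rw [hd]
      simp only [pvLeadLower, hc, Bool.false_eq_true, if_false]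
      omega
    · rw [List.drop_eq_nil_of_le (by omega)]; simp [pvLeadLower]
termination_by cs.length - k
decreasing_by rename_i hcond; exact Nat.sub_succ_lt_self _ _ hcond.1

-- B-side: the outer loop with enough fuel computes out ++ pvRec (suffix from start)
theorem pvLoopB_eq (cs : List Char) :
    ∀ (fuel start : Nat) (out : List (List Char)), start ≤ cs.length →
      cs.length - start < fuel →
      pvLoopB cs fuel start out = out ++ pvRec (cs.drop start) := by
  intro fuel
  induction fuel with
  | zero => intro start out _ hf; omega
  | succ fuel ih =>
      intro start out hs hf
      simp only [pvLoopB, pvScanB_eq]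
      have hm := pvLeadLower_le (cs.drop start)
      rw [List.length_drop] at hm
      by_cases hend : start + pvLeadLower (cs.drop start) = cs.length
      · rw [if_pos hend]
        conv_rhs => rw [pvRec, if_pos (by rw [List.length_drop]; omega)]
      · rw [if_neg hend]
        have hk : start + pvLeadLower (cs.drop start) < cs.length := by omega
        rw [ih (start + pvLeadLower (cs.drop start) + 1) _ (by omega) (by omega)]
        conv_rhs => rw [pvRec, if_neg (by rw [List.length_drop]; omega)]
        have h1 : start + pvLeadLower (cs.drop start) - start = pvLeadLower (cs.drop start) := by
          omega
        have h2 : cs.getD (start + pvLeadLower (cs.drop start)) ' '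
            = (cs.drop start).getD (pvLeadLower (cs.drop start)) ' ' := by
          rw [List.getD_eq_getElem _ _ hk,
              List.getD_eq_getElem _ _ (by rw [List.length_drop]; omega)]
          simp [List.getElem_drop]
        have h3 : cs.drop (start + pvLeadLower (cs.drop start) + 1)
            = (cs.drop start).drop (pvLeadLower (cs.drop start) + 1) := by
          rw [List.drop_drop]; ring_nf
        rw [h1, h2, h3]
        simp

-- ===== VERDICT (by name: the statement is the Claim_ definition above) =====
theorem partition_a2m_string_spec : Claim_equal_partition_a2m_string := by
  intro s _
  unfold Spec_partition_a2m_string partition_a2m_string_alt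
  obtain ⟨h, t, hrec⟩ := pvRec_exists_cons s.toList
  rw [pvLoopB_eq s.toList (s.toList.length + 1) 0 [] (by omega) (by omega)]
  have hA : partition_a2m_string s = (pvGoB s.toList [] []).map String.ofList := by
    unfold partition_a2m_string
    exact congrArg (List.map String.ofList) (pv_invariant s.toList true [[]] [] [] (by simp))
  rw [hA, pvGoB_eq_pvRec]
  simp [hrec]
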